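-- pv_equiv track=rewrite | github.com/parmoham-aws/test-repo-parmoham | tests/distributed/ddp_tests/utils.py | _build_buckets
-- ===== SOURCE A (Python) =====
-- def _build_buckets(param_sizes, bucket_cap_bytes):
--     """Build buckets based on parameter sizes and capacity.
--
--     Args:
--         param_sizes: List of parameter sizes in bytes.
--         bucket_cap_bytes: Maximum bucket capacity in bytes.
--
--     Returns:
--         tuple: (buckets, bucket_sizes) where buckets contains parameter indices
--                and bucket_sizes contains the size of each bucket.
--     """
--     buckets = []
--     current_bucket = []
--     current_size = 0
--     bucket_sizes = []
--
--     for i in range(len(param_sizes)):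
--         current_bucket.append(len(param_sizes) - 1 - i)  # Append indices in reverse order
--         current_size += param_sizes[i]
--
--         if current_size > bucket_cap_bytes:
--             bucket_sizes.append(current_size)
--             current_size = 0
--             buckets.append(current_bucket)  # mark this bucket as closed
--             current_bucket = []  # start a new bucket
--
--     if current_bucket:
--         buckets.append(current_bucket)
--         bucket_sizes.append(current_size)
--
--     return buckets, bucket_sizes
-- ===== SOURCE B (Python) =====
-- def _build_buckets(param_sizes, bucket_cap_bytes):
--     """Two-pass rewrite: first compute bucket lengths and sizes with only a
--     running count/size, then slice the reversed index list into segments."""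
--     lengths = []
--     bucket_sizes = []
--     count = 0
--     size = 0
--     for s in param_sizes:
--         count += 1
--         size += s
--         if size > bucket_cap_bytes:
--             lengths.append(count)
--             bucket_sizes.append(size)
--             count = 0
--             size = 0
--     if count:
--         lengths.append(count)
--         bucket_sizes.append(size)
--     rev = list(range(len(param_sizes) - 1, -1, -1))
--     buckets = []
--     pos = 0
--     for L in lengths:
--         buckets.append(rev[pos:pos + L])
--         pos += L
--     return buckets, bucket_sizes
-- ===== Notes on version B (the rewrite author's own statement) =====
-- stated objective: alternative
-- what changed: A interleaves per-element index appends with the size check in one loop; B separates concerns into two passes: a greedy pass keeping only a running count/size that emits bucket lengths and sizes, then a pass slicing the reversed index list into segments of those lengths.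
import Mathlib
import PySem

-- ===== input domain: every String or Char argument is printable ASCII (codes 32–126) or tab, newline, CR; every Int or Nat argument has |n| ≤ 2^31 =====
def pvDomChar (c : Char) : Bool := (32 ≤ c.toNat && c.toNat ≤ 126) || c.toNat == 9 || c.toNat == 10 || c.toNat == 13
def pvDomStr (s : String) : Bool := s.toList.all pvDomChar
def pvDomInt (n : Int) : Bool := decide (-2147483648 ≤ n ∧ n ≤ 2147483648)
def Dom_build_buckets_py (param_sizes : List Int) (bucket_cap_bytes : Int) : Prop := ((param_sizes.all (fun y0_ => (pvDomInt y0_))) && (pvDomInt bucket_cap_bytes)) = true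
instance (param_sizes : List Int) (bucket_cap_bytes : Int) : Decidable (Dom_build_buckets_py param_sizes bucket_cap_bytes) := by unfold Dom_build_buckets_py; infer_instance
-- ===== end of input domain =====

-- B replaces A's single interleaved loop by a two-pass decomposition (greedy
-- count/size pass producing lengths, then slicing the reversed index range);
-- objective: alternative structure, same O(n) cost.

-- ===== PORT A =====
-- one step of A's loop body ('for i in range(len(param_sizes))', using i and param_sizes[i],
-- transcribed as a fold over enumerate; state = (buckets, current_bucket, current_size, bucket_sizes))
def bbAStep (n cap : Int) (st : List (List Int) × List Int × Int × List Int) (p : Int × Int) :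
    List (List Int) × List Int × Int × List Int :=
  let cur := st.2.1 ++ [n - 1 - p.1]
  let csize := st.2.2.1 + p.2
  if csize > cap then (st.1 ++ [cur], [], 0, st.2.2.2 ++ [csize])
  else (st.1, cur, csize, st.2.2.2)

def build_buckets_py (param_sizes : List Int) (bucket_cap_bytes : Int) : List (List Int) × List Int :=
  let n : Int := param_sizes.length
  let st := (PySem.List.enumerate param_sizes 0).foldl (bbAStep n bucket_cap_bytes) ([], [], 0, [])
  if st.2.1 ≠ [] then (st.1 ++ [st.2.1], st.2.2.2 ++ [st.2.2.1]) else (st.1, st.2.2.2)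

-- ===== PORT B =====
-- pass 1 step: state = (count, size, lengths, bucket_sizes)
def bbBStep (cap : Int) (st : Int × Int × List Int × List Int) (s : Int) :
    Int × Int × List Int × List Int :=
  let count := st.1 + 1
  let size := st.2.1 + s
  if size > cap then (0, 0, st.2.2.1 ++ [count], st.2.2.2 ++ [size])
  else (count, size, st.2.2.1, st.2.2.2)

-- pass 2 step for a fixed rev: state = (buckets, pos); rev[pos:pos+L]
def bbCStep (rev : List Int) (st : List (List Int) × Int) (L : Int) : List (List Int) × Int :=
  (st.1 ++ [PySem.List.slice rev (some st.2) (some (st.2 + L))], st.2 + L)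

def build_buckets_py_alt (param_sizes : List Int) (bucket_cap_bytes : Int) : List (List Int) × List Int :=
  let p := param_sizes.foldl (bbBStep bucket_cap_bytes) (0, 0, [], [])
  let lengths := if p.1 ≠ 0 then p.2.2.1 ++ [p.1] else p.2.2.1
  let bucket_sizes := if p.1 ≠ 0 then p.2.2.2 ++ [p.2.1] else p.2.2.2
  let rev := PySem.List.pyRange ((param_sizes.length : Int) - 1) (-1) (-1)
  let st := lengths.foldl (bbCStep rev) ([], 0)
  (st.1, bucket_sizes)

-- ===== PRECONDITION & SPEC =====
def Spec_build_buckets_py (param_sizes : List Int) (bucket_cap_bytes : Int) (out : List (List Int) × List Int) : Prop := out = build_buckets_py_alt param_sizes bucket_cap_bytes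
instance (param_sizes : List Int) (bucket_cap_bytes : Int) (out : List (List Int) × List Int) : Decidable (Spec_build_buckets_py param_sizes bucket_cap_bytes out) := by unfold Spec_build_buckets_py; infer_instance

-- ===== CLAIM (what is proved, stated in full; the proofs are below) =====
def Claim_equal_build_buckets_py : Prop := ∀ (param_sizes : List Int) (bucket_cap_bytes : Int), Dom_build_buckets_py param_sizes bucket_cap_bytes → Spec_build_buckets_py param_sizes bucket_cap_bytes (build_buckets_py param_sizes bucket_cap_bytes)

-- ===== LEMMAS AND PROOFS =====

-- reference recursion capturing A's loop with next index j and open bucket (cur, csize)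
def specBB (cap : Int) : List Int → Int → List Int → Int → List (List Int) × List Int
  | [], _, cur, csize => if cur ≠ [] then ([cur], [csize]) else ([], [])
  | s :: xs, j, cur, csize =>
      let cur' := cur ++ [j]
      let c' := csize + s
      if c' > cap then
        let r := specBB cap xs (j - 1) [] 0
        (cur' :: r.1, c' :: r.2)
      else specBB cap xs (j - 1) cur' c'

-- reference recursion for B's first pass
def pass1 (cap : Int) : List Int → Int → Int → List Int × List Int
  | [], count, size => if count ≠ 0 then ([count], [size]) else ([], [])
  | s :: xs, count, size =>
      let c := count + 1
      let z := size + s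
      if z > cap then
        let r := pass1 cap xs 0 0
        (c :: r.1, z :: r.2)
      else pass1 cap xs c z

-- reference recursion for B's second pass (take/drop form)
def chunksTD : List Int → List Int → List (List Int)
  | _, [] => []
  | r, L :: Ls => r.take L.toNat :: chunksTD (r.drop L.toNat) Ls

-- the descending run j, j-1, …, j-k+1
def descL (j : Int) : Nat → List Int
  | 0 => []
  | k + 1 => j :: descL (j - 1) k

lemma foldA_eq (cap n : Int) : ∀ (xs : List Int) (t : Int) (B0 : List (List Int)) (cur0 : List Int) (cs0 : Int) (S0 : List Int),
    (let st := (PySem.List.enumerate xs t).foldl (bbAStep n cap) (B0, cur0, cs0, S0)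
     if st.2.1 ≠ [] then (st.1 ++ [st.2.1], st.2.2.2 ++ [st.2.2.1]) else (st.1, st.2.2.2))
    = (B0 ++ (specBB cap xs (n - 1 - t) cur0 cs0).1, S0 ++ (specBB cap xs (n - 1 - t) cur0 cs0).2) := by
  intro xs
  induction xs with
  | nil =>
      intro t B0 cur0 cs0 S0
      simp only [PySem.List.enumerate_nil, List.foldl_nil, specBB]
      split <;> simp
  | cons s xs ih =>
      intro t B0 cur0 cs0 S0
      simp only [PySem.List.enumerate_cons, List.foldl_cons, specBB, bbAStep]
      by_cases h : cs0 + s > cap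
      · simp only [h, if_pos]
        rw [ih]
        have : n - 1 - (t + 1) = n - 1 - t - 1 := by ring
        simp [this, List.append_assoc]
      · simp only [h, if_false]
        rw [ih]
        have : n - 1 - (t + 1) = n - 1 - t - 1 := by ring
        simp [this]

lemma foldB_eq (cap : Int) : ∀ (xs : List Int) (count size : Int) (Ls Ss : List Int),
    (let p := xs.foldl (bbBStep cap) (count, size, Ls, Ss)
     ((if p.1 ≠ 0 then p.2.2.1 ++ [p.1] else p.2.2.1),
      (if p.1 ≠ 0 then p.2.2.2 ++ [p.2.1] else p.2.2.2)))
    = (Ls ++ (pass1 cap xs count size).1, Ss ++ (pass1 cap xs count size).2) := by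
  intro xs
  induction xs with
  | nil =>
      intro count size Ls Ss
      simp only [List.foldl_nil, pass1]
      split <;> simp
  | cons s xs ih =>
      intro count size Ls Ss
      simp only [List.foldl_cons, pass1, bbBStep]
      by_cases h : size + s > cap
      · simp only [h, if_pos]
        rw [ih]
        simp [List.append_assoc]
      · simp only [h, if_false]
        rw [ih]

lemma foldC_eq (rev : List Int) : ∀ (Ls : List Int) (B0 : List (List Int)) (pos : Int),
    0 ≤ pos → (∀ L ∈ Ls, 0 ≤ L) →
    (Ls.foldl (bbCStep rev) (B0, pos)).1 = B0 ++ chunksTD (rev.drop pos.toNat) Ls := by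
  intro Ls
  induction Ls with
  | nil => intro B0 pos _ _; simp [chunksTD]
  | cons L Ls ih =>
      intro B0 pos hpos h
      have hL : 0 ≤ L := h L (by simp)
      simp only [List.foldl_cons, bbCStep, chunksTD]
      rw [PySem.List.slice_toNat _ hpos (by omega),
        ih _ _ (by omega) (fun x hx => h x (by simp [hx]))]
      have h1 : (pos + L).toNat - pos.toNat = L.toNat := by omega
      have h2 : rev.drop (pos + L).toNat = (rev.drop pos.toNat).drop L.toNat := by
        rw [List.drop_drop]; congr 1; omega
      simp [h1, h2, List.append_assoc]

lemma pass1_nonneg (cap : Int) : ∀ (xs : List Int) (count size : Int), 0 ≤ count →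
    ∀ L ∈ (pass1 cap xs count size).1, 0 ≤ L := by
  intro xs
  induction xs with
  | nil =>
      intro count size hc L hL
      simp only [pass1] at hL
      split at hL <;> simp_all
  | cons s xs ih =>
      intro count size hc L hL
      simp only [pass1] at hL
      split at hL
      · rcases List.mem_cons.mp hL with h | h
        · omega
        · exact ih 0 0 le_rfl L h
      · exact ih (count + 1) (size + s) (by omega) L hL

lemma spec_eq_pass1_chunks (cap : Int) : ∀ (xs : List Int) (j : Int) (cur : List Int) (csize : Int),
    specBB cap xs j cur csize
      = (chunksTD (cur ++ descL j xs.length) (pass1 cap xs (cur.length : Int) csize).1,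
         (pass1 cap xs (cur.length : Int) csize).2) := by
  intro xs
  induction xs with
  | nil =>
      intro j cur csize
      simp only [specBB, pass1, List.length_nil, descL, List.append_nil]
      by_cases h : cur = []
      · simp [h, chunksTD]
      · simp [h, chunksTD]
  | cons s xs ih =>
      intro j cur csize
      simp only [specBB, pass1, List.length_cons, descL]
      by_cases h : csize + s > cap
      · simp only [h, if_pos]
        rw [ih (j - 1) [] 0]
        have ht : ((cur.length : Int) + 1).toNat = cur.length + 1 := by omega
        simp only [chunksTD, ht, List.length_nil, Nat.cast_zero, List.nil_append]
        have h1 : cur ++ j :: descL (j - 1) xs.length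
            = (cur ++ [j]) ++ descL (j - 1) xs.length := by simp
        rw [h1, List.take_append_of_le_length (by simp),
          List.drop_append_of_le_length (by simp)]
        simp
      · simp only [h, if_false]
        rw [ih (j - 1) (cur ++ [j]) (csize + s)]
        have hlen : ((cur ++ [j]).length : Int) = (cur.length : Int) + 1 := by
          simp
        rw [hlen]
        simp [List.append_assoc]

lemma pyRange_descL : ∀ (n : Nat), PySem.List.pyRange ((n : Int) - 1) (-1) (-1) = descL ((n : Int) - 1) n := by
  intro n
  induction n with
  | zero => simp [PySem.List.pyRange_neg_one_eq_nil, descL]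
  | succ k ih =>
      have hcast : ((k + 1 : Nat) : Int) - 1 = (k : Int) := by push_cast; ring
      rw [hcast, PySem.List.pyRange_neg_one_cons (by omega), descL.eq_def]
      cases k with
      | zero => simp [PySem.List.pyRange_neg_one_eq_nil, descL]
      | succ m =>
          have hc2 : ((m + 1 : Nat) : Int) - 1 = ((m + 1 : Nat) : Int) - 1 := rfl
          have := ih
          rw [show ((m + 1 : Nat) : Int) - 1 = ((m + 1 : Nat) : Int) - 1 from rfl] at this
          simpa [Nat.cast_succ] using this

-- ===== VERDICT (by name: the statement is the Claim_ definition above) =====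
theorem build_buckets_py_spec : Claim_equal_build_buckets_py := by
  intro xs cap _
  unfold Spec_build_buckets_py build_buckets_py build_buckets_py_alt
  have hA := foldA_eq cap (xs.length : Int) xs 0 [] [] 0 []
  simp only [sub_zero] at hA
  simp only [hA]
  have hB := foldB_eq cap xs 0 0 [] []
  simp only [List.nil_append] at hB
  have hL : (let p := xs.foldl (bbBStep cap) (0, 0, [], [])
      ((if p.1 ≠ 0 then p.2.2.1 ++ [p.1] else p.2.2.1),
       (if p.1 ≠ 0 then p.2.2.2 ++ [p.2.1] else p.2.2.2))).1 = (pass1 cap xs 0 0).1 := by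
    rw [hB]
  have hS : (let p := xs.foldl (bbBStep cap) (0, 0, [], [])
      ((if p.1 ≠ 0 then p.2.2.1 ++ [p.1] else p.2.2.1),
       (if p.1 ≠ 0 then p.2.2.2 ++ [p.2.1] else p.2.2.2))).2 = (pass1 cap xs 0 0).2 := by
    rw [hB]
  simp only at hL hS
  rw [spec_eq_pass1_chunks cap xs ((xs.length : Int) - 1) [] 0]
  simp only [List.length_nil, Nat.cast_zero, List.nil_append]
  rw [hL, hS, pyRange_descL xs.length,
    foldC_eq _ _ _ 0 le_rfl (pass1_nonneg cap xs 0 0 le_rfl)]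
  simp
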